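-- pv_equiv track=rewrite | github.com/dimaxano/visper | visper/data/utils.py | shorten2length
-- ===== SOURCE A (Python) =====
-- def shorten2length(video, lenght=29):
--     current_lenght = len(video)
--
--     diff = current_lenght - lenght
--
--     frame_counter = 0
--     diff_count = 0
--     while diff_count < diff:
--         if frame_counter >= len(video):
--             frame_counter = 0
--
--         if frame_counter % 2 == 0:
--             video.pop(frame_counter)
--             diff_count += 1
--
--         frame_counter += 1
--
--
--     return video
-- ===== SOURCE B (Python) =====
-- def shorten2length(video, lenght=29):
--     # Pass-based rewrite: each cycle of A removes every third element of the
--     # current list (indices 0,3,6,...), so do whole passes with slicing-style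
--     # filters instead of repeated O(n) pops.  Does not mutate `video`.
--     need = len(video) - lenght
--     cur = video
--     while need > 0 and cur:
--         t = min(need, (len(cur) + 2) // 3)
--         cur = [x for i, x in enumerate(cur) if i % 3 != 0 or i >= 3 * t]
--         need -= t
--     return cur
-- ===== Notes on version B (the rewrite author's own statement) =====
-- stated objective: faster
-- what changed: Replaces the pop-one-index-at-a-time loop (each pop O(n)) by whole passes that drop every third element with a single filter per pass, so the work per pass is linear and pass sizes shrink geometrically; B does not mutate its argument (A does).
import Mathlib
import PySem

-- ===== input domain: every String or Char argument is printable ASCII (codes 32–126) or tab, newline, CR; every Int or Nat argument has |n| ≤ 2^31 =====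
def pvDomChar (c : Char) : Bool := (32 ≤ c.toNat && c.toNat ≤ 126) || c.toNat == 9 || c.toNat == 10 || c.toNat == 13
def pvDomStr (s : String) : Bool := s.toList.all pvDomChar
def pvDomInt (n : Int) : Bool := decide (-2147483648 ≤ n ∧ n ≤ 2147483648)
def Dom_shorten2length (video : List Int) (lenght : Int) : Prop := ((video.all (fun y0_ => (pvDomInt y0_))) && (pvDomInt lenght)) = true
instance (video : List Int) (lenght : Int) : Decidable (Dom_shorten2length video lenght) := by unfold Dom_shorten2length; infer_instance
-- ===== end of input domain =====

-- B replaces A's one-pop-at-a-time loop by whole filter passes (each pass of A removes every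
-- third element), which is asymptotically faster; equivalence is about the RETURN value only:
-- Python A mutates `video` in place, B does not.

-- ===== PORT A =====
-- The while loop of A as structural recursion on the state (video, frame_counter, diff_count).
-- When frame_counter >= len(video) Python resets it to 0 and the parity test 0 % 2 == 0 is
-- trivially true, so the reset branch pops index 0 directly (same computation, test folded).
def shorten2lengthLoop (video : List Int) (diff : Int) (frame_counter : Nat) (diff_count : Int) : List Int :=
  if diff_count < diff then
    if video.length ≤ frame_counter then
      match PySem.List.pop? video 0 with
      | none => video        -- Python raises IndexError here (empty list; outside Pre_)
      | some (_, rest) => shorten2lengthLoop rest diff 1 (diff_count + 1)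
    else if frame_counter % 2 = 0 then
      match PySem.List.pop? video (frame_counter : Int) with
      | none => video
      | some (_, rest) => shorten2lengthLoop rest diff (frame_counter + 1) (diff_count + 1)
    else
      shorten2lengthLoop video diff (frame_counter + 1) diff_count
  else video
termination_by ((diff - diff_count).toNat, video.length - frame_counter)
decreasing_by
  · left; omega
  · left; omega
  · right; omega

def shorten2length (video : List Int) (lenght : Int) : List Int :=
  shorten2lengthLoop video ((video.length : Int) - lenght) 0 0

-- ===== PORT B =====
-- One iteration = one whole pass of removals, done by a single filtered comprehension.
def shorten2lengthAltLoop (cur : List Int) (need : Int) : List Int :=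
  if h : 0 < need ∧ cur ≠ [] then
    let t := min need (PySem.Int.floordiv ((cur.length : Int) + 2) 3)
    let cur' := (PySem.List.enumerate cur).filterMap
      (fun p => if p.1 % 3 ≠ 0 ∨ 3 * t ≤ p.1 then some p.2 else none)
    shorten2lengthAltLoop cur' (need - t)
  else cur
termination_by need.toNat
decreasing_by
  have hl : 1 ≤ (cur.length : Int) := by
    have := List.length_pos_of_ne_nil h.2
    omega
  have h3 : 1 ≤ PySem.Int.floordiv ((cur.length : Int) + 2) 3 := by
    rw [PySem.Int.floordiv_eq_ediv_of_pos (by omega)]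
    omega
  omega

def shorten2length_alt (video : List Int) (lenght : Int) : List Int :=
  shorten2lengthAltLoop video ((video.length : Int) - lenght)

-- ===== PRECONDITION & SPEC =====
-- When lenght < 0 Python A empties the list and then pops from it, raising IndexError;
-- for every lenght ≥ 0 A returns normally.
def Pre_shorten2length (_video : List Int) (lenght : Int) : Prop := 0 ≤ lenght
instance (video : List Int) (lenght : Int) : Decidable (Pre_shorten2length video lenght) := by unfold Pre_shorten2length; infer_instance
def pvWitness_shorten2length : List Int × Int := ([5, 4, 3, 2, 1, 0, 9], 3)

def Spec_shorten2length (video : List Int) (lenght : Int) (out : List Int) : Prop := out = shorten2length_alt video lenght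
instance (video : List Int) (lenght : Int) (out : List Int) : Decidable (Spec_shorten2length video lenght out) := by unfold Spec_shorten2length; infer_instance

-- ===== CLAIM (what is proved, stated in full; the proofs are below) =====
def Claim_equal_shorten2length : Prop := ∀ (video : List Int) (lenght : Int), Dom_shorten2length video lenght → Pre_shorten2length video lenght → Spec_shorten2length video lenght (shorten2length video lenght)
-- ===== LEMMAS AND PROOFS =====

-- Proof-side recursive form of one (possibly partial) pass: remove the t elements at
-- indices 0, 3, 6, …, 3(t-1) (one removal consumes the head and keeps the next two).
def keepR : List Int → Nat → List Int
  | w, 0 => w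
  | [], _ + 1 => []
  | _ :: v, t + 1 => v.take 2 ++ keepR (v.drop 2) t
termination_by _ t => t

-- Proof-side generalisation of B's loop to a mid-pass offset c (an even frame counter).
def passG (w : List Int) (c : Nat) (r : Int) : List Int :=
  if h : 0 < r ∧ w ≠ [] then
    if w.length ≤ c then passG w 0 r
    else
      passG (w.take c ++ keepR (w.drop c) (min r (((w.length - c + 2) / 3 : Nat) : Int)).toNat) 0
        (r - min r (((w.length - c + 2) / 3 : Nat) : Int))
  else w
termination_by (r.toNat, c)
decreasing_by
  · right
    have := List.length_pos_of_ne_nil h.2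
    omega
  · left
    have : c < w.length := by omega
    have h1 : 1 ≤ (w.length - c + 2) / 3 := by omega
    omega

theorem keepR_nil (t : Nat) : keepR [] t = [] := by cases t <;> rw [keepR]

-- B's filter keeps everything once all indices are ≥ the cut-off b.
theorem keepB_all (b : Int) (w : List Int) : ∀ s : Int, b ≤ s →
    (PySem.List.enumerate w s).filterMap
      (fun p => if p.1 % 3 ≠ 0 ∨ b ≤ p.1 then some p.2 else none) = w := by
  induction w with
  | nil => intro s _; simp [PySem.List.enumerate_nil]
  | cons x xs ih =>
    intro s hs
    rw [PySem.List.enumerate_cons, List.filterMap_cons]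
    simp only [if_pos (Or.inr hs)]
    rw [ih (s + 1) (by omega)]

theorem filterMap_keep (b s y : Int) (rest : List (Int × Int)) (h : s % 3 ≠ 0 ∨ b ≤ s) :
    List.filterMap (fun p : Int × Int => if p.1 % 3 ≠ 0 ∨ b ≤ p.1 then some p.2 else none) ((s, y) :: rest)
      = y :: List.filterMap (fun p : Int × Int => if p.1 % 3 ≠ 0 ∨ b ≤ p.1 then some p.2 else none) rest :=
  List.filterMap_cons_some (by
    show (if s % 3 ≠ 0 ∨ b ≤ s then some y else none) = some y
    rw [if_pos h])

theorem filterMap_drop (b s y : Int) (rest : List (Int × Int)) (h1 : s % 3 = 0) (h2 : ¬ b ≤ s) :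
    List.filterMap (fun p : Int × Int => if p.1 % 3 ≠ 0 ∨ b ≤ p.1 then some p.2 else none) ((s, y) :: rest)
      = List.filterMap (fun p : Int × Int => if p.1 % 3 ≠ 0 ∨ b ≤ p.1 then some p.2 else none) rest :=
  List.filterMap_cons_none (by
    show (if s % 3 ≠ 0 ∨ b ≤ s then some y else none) = none
    rw [if_neg (fun hor => hor.elim (fun hh => hh h1) h2)])

-- B's filtered comprehension computes keepR, for any start index s ≡ 0 (mod 3)
-- and cut-off b = 3*t + s.
theorem keepB_eq (t : Nat) : ∀ (w : List Int) (s b : Int), 0 ≤ s → s % 3 = 0 → b = 3 * t + s →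
    (PySem.List.enumerate w s).filterMap
      (fun p => if p.1 % 3 ≠ 0 ∨ b ≤ p.1 then some p.2 else none) = keepR w t := by
  induction t with
  | zero =>
    intro w s b hs _ hb
    rw [keepR]
    exact keepB_all _ _ _ (by omega)
  | succ t ih =>
    intro w s b hs hmod hb
    match w with
    | [] => simp [PySem.List.enumerate_nil, keepR_nil]
    | x :: v =>
      rw [PySem.List.enumerate_cons, filterMap_drop b s x _ hmod (by omega), keepR]
      match v with
      | [] => simp [PySem.List.enumerate_nil, keepR_nil]
      | y :: v' =>
        rw [PySem.List.enumerate_cons, filterMap_keep b (s + 1) y _ (Or.inl (by omega))]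
        match v' with
        | [] => simp [PySem.List.enumerate_nil, keepR_nil]
        | z :: v'' =>
          rw [PySem.List.enumerate_cons, filterMap_keep b (s + 1 + 1) z _ (Or.inl (by omega))]
          rw [ih v'' (s + 1 + 1 + 1) b (by omega) (by omega) (by omega)]
          simp

theorem keepB_eq0 (w : List Int) (t : Int) (ht : 0 ≤ t) :
    (PySem.List.enumerate w 0).filterMap
      (fun p => if p.1 % 3 ≠ 0 ∨ 3 * t ≤ p.1 then some p.2 else none) = keepR w t.toNat := by
  exact keepB_eq t.toNat w 0 (3 * t) le_rfl (by norm_num) (by omega)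

-- Core pass identity: removing one element at c and continuing the pass at c+2 is the
-- same as a pass of t+1 removals starting at c.
theorem pass_absorb (w : List Int) (c t : Nat) (hc : c < w.length) :
    w.take c ++ keepR (w.drop c) (t + 1) =
      (w.eraseIdx c).take (c + 2) ++ keepR ((w.eraseIdx c).drop (c + 2)) t := by
  rw [List.drop_eq_getElem_cons hc, keepR, List.eraseIdx_eq_take_drop_succ]
  have hlen : (w.take c).length = c := by simp; omega
  rw [List.take_append, List.drop_append, hlen, List.take_take,
    show min (c + 2) c = c from by omega,
    List.drop_eq_nil_of_le (i := c + 2) (by rw [hlen]; omega),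
    show c + 2 - c = 2 from by omega, List.nil_append, List.append_assoc]

-- Unfolding helpers for passG.
theorem passG_stop (w : List Int) (c : Nat) (r : Int) (h : ¬(0 < r ∧ w ≠ [])) :
    passG w c r = w := by rw [passG, dif_neg h]

theorem passG_reset (w : List Int) (c : Nat) (r : Int) (hc : w.length ≤ c) :
    passG w c r = passG w 0 r := by
  by_cases h : 0 < r ∧ w ≠ []
  · rw [passG, dif_pos h, if_pos hc]
  · rw [passG_stop _ _ _ h, passG_stop _ _ _ h]

-- One pop of A absorbed into passG.
theorem passG_pop (w : List Int) (c : Nat) (r : Int) (hc : c < w.length) (hr : 1 ≤ r) :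
    passG w c r = passG (w.eraseIdx c) (c + 2) (r - 1) := by
  have hw : w ≠ [] := by intro h; subst h; simp at hc
  have ha1 : 1 ≤ (w.length - c + 2) / 3 := by omega
  rw [passG, dif_pos ⟨by omega, hw⟩, if_neg (by omega)]
  by_cases hr1 : r = 1
  · subst hr1
    have ht : min (1 : Int) (((w.length - c + 2) / 3 : Nat) : Int) = 1 := by omega
    rw [ht]
    have hlist : w.take c ++ keepR (w.drop c) (1 : Int).toNat = w.eraseIdx c := by
      have := pass_absorb w c 0 hc
      rw [show (1 : Int).toNat = 0 + 1 from rfl, this, keepR, List.take_append_drop]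
    rw [hlist]
    rw [passG_stop _ _ _ (by simp), passG_stop _ _ _ (by simp)]
  · -- r ≥ 2
    have hr2 : 2 ≤ r := by omega
    by_cases hlen1 : w.length = 1
    · -- c = 0, erase empties the list
      have hc0 : c = 0 := by omega
      subst hc0
      have ht : min r (((w.length - 0 + 2) / 3 : Nat) : Int) = 1 := by
        rw [hlen1]; omega
      rw [ht]
      have he : w.eraseIdx 0 = [] := by
        match w, hlen1 with
        | [x], _ => rfl
      have hlist : w.take 0 ++ keepR (w.drop 0) (1 : Int).toNat = [] := by
        have := pass_absorb w 0 0 hc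
        rw [show (1 : Int).toNat = 0 + 1 from rfl, this, keepR, he]
        simp
      rw [hlist, he, passG_stop _ _ _ (by simp), passG_stop _ _ _ (by simp)]
    · have hw' : w.eraseIdx c ≠ [] := by
        have := List.length_eraseIdx_of_lt hc
        intro h
        rw [h] at this
        simp at this
        omega
      have hlen' : (w.eraseIdx c).length = w.length - 1 := List.length_eraseIdx_of_lt hc
      by_cases hnear : w.length - 1 ≤ c + 2
      · -- A's next pop resets: both sides start a fresh pass on the erased list
        have ht : min r (((w.length - c + 2) / 3 : Nat) : Int) = 1 := by
          have : (w.length - c + 2) / 3 = 1 := by omega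
          rw [this]; omega
        rw [ht]
        have hlist : w.take c ++ keepR (w.drop c) (1 : Int).toNat = w.eraseIdx c := by
          have := pass_absorb w c 0 hc
          rw [show (1 : Int).toNat = 0 + 1 from rfl, this, keepR, List.take_append_drop]
        rw [hlist]
        exact (passG_reset (w.eraseIdx c) (c + 2) (r - 1) (by omega)).symm
      · -- deep pass: one more removal on the left equals the pass continued at c+2
        have h4 : c + 4 ≤ w.length := by omega
        set a' : Nat := (w.length - 1 - (c + 2) + 2) / 3 with ha'
        have haa : (w.length - c + 2) / 3 = a' + 1 := by omega
        have ha'1 : 1 ≤ a' := by omega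
        set t' : Int := min (r - 1) (a' : Int) with ht'
        have htt : min r (((w.length - c + 2) / 3 : Nat) : Int) = t' + 1 := by
          rw [haa]; push_cast; omega
        rw [htt]
        conv_rhs => rw [passG]
        rw [dif_pos ⟨show (0:Int) < r - 1 by omega, hw'⟩, if_neg (by omega), hlen']
        have harg : w.take c ++ keepR (w.drop c) (t' + 1).toNat =
            (w.eraseIdx c).take (c + 2) ++ keepR ((w.eraseIdx c).drop (c + 2)) t'.toNat := by
          have hT : (t' + 1).toNat = t'.toNat + 1 := by omega
          rw [hT]
          exact pass_absorb w c t'.toNat hc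
        rw [harg, ← ht']
        have : r - (t' + 1) = r - 1 - t' := by ring
        rw [this]

-- B's loop is passG at offset 0.
theorem altLoop_eq_passG (n : Nat) : ∀ (r : Int) (w : List Int), r.toNat = n →
    shorten2lengthAltLoop w r = passG w 0 r := by
  induction n using Nat.strong_induction_on with
  | _ n ih =>
    intro r w hn
    by_cases h : 0 < r ∧ w ≠ []
    · have hl : 1 ≤ w.length := List.length_pos_of_ne_nil h.2
      have hfd : PySem.Int.floordiv ((w.length : Int) + 2) 3 = (((w.length - 0 + 2) / 3 : Nat) : Int) := by
        rw [PySem.Int.floordiv_eq_ediv_of_pos (by omega)]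
        omega
      have ha1 : 1 ≤ (w.length - 0 + 2) / 3 := by omega
      rw [shorten2lengthAltLoop, dif_pos h, passG, dif_pos h, if_neg (by omega)]
      simp only [hfd]
      set t : Int := min r (((w.length - 0 + 2) / 3 : Nat) : Int) with ht
      have ht1 : 1 ≤ t := by rw [ht]; omega
      rw [keepB_eq0 _ _ (by omega)]
      have harg : w.take 0 ++ keepR (w.drop 0) t.toNat = keepR w t.toNat := by simp
      rw [harg]
      exact ih (r - t).toNat (by omega) _ _ rfl
    · rw [shorten2lengthAltLoop, dif_neg h, passG_stop _ _ _ h]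

-- Skipping an odd frame counter does not change A's loop.
theorem loopA_oddSkip (w : List Int) (diff : Int) (c : Nat) (dc : Int) (hodd : c % 2 = 1) :
    shorten2lengthLoop w diff c dc = shorten2lengthLoop w diff (c + 1) dc := by
  by_cases hd : dc < diff
  · by_cases hc : w.length ≤ c
    · rw [shorten2lengthLoop, if_pos hd, if_pos hc,
        shorten2lengthLoop, if_pos hd, if_pos (by omega : w.length ≤ c + 1)]
    · rw [shorten2lengthLoop, if_pos hd, if_neg hc, if_neg (by omega)]
  · rw [shorten2lengthLoop, if_neg hd, shorten2lengthLoop, if_neg hd]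

-- Main invariant: from an even frame counter, A's loop computes passG.
theorem loopA_eq_passG (n : Nat) : ∀ (diff dc : Int) (w : List Int) (c : Nat),
    (diff - dc).toNat = n → c % 2 = 0 →
    shorten2lengthLoop w diff c dc = passG w c (diff - dc) := by
  induction n using Nat.strong_induction_on with
  | _ n ih =>
    intro diff dc w c hn hc2
    by_cases hd : dc < diff
    · by_cases hc : w.length ≤ c
      · match w with
        | [] =>
          rw [shorten2lengthLoop, if_pos hd, if_pos hc, passG_stop _ _ _ (by simp)]
          simp [PySem.List.pop?, PySem.List.pyIdx?]
        | x :: xs =>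
          rw [shorten2lengthLoop, if_pos hd, if_pos hc, PySem.List.pop?_zero_cons]
          show shorten2lengthLoop xs diff 1 (dc + 1) = passG (x :: xs) c (diff - dc)
          rw [loopA_oddSkip xs diff 1 (dc + 1) (by norm_num)]
          rw [ih (diff - (dc + 1)).toNat (by omega) diff (dc + 1) xs 2 rfl (by norm_num)]
          rw [passG_reset _ _ _ hc,
            passG_pop (x :: xs) 0 (diff - dc) (by simp) (by omega)]
          rw [show diff - dc - 1 = diff - (dc + 1) from by ring, List.eraseIdx_cons_zero]
      · have hclt : c < w.length := by omega
        rw [shorten2lengthLoop, if_pos hd, if_neg hc, if_pos hc2,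
          PySem.List.pop?_natCast w c hclt]
        show shorten2lengthLoop (w.eraseIdx c) diff (c + 1) (dc + 1) = passG w c (diff - dc)
        rw [loopA_oddSkip (w.eraseIdx c) diff (c + 1) (dc + 1) (by omega)]
        rw [ih (diff - (dc + 1)).toNat (by omega) diff (dc + 1) (w.eraseIdx c) (c + 1 + 1) rfl (by omega)]
        rw [show c + 1 + 1 = c + 2 from rfl,
          show diff - (dc + 1) = diff - dc - 1 from by ring,
          ← passG_pop w c (diff - dc) hclt (by omega)]
    · rw [shorten2lengthLoop, if_neg hd, passG_stop _ _ _ (by omega)]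

-- ===== VERDICT (by name: the statement is the Claim_ definition above) =====
theorem shorten2length_spec : Claim_equal_shorten2length := by
  unfold Claim_equal_shorten2length Spec_shorten2length
  intro video lenght _ _
  unfold shorten2length shorten2length_alt
  rw [loopA_eq_passG ((video.length : Int) - lenght - 0).toNat _ _ _ _ rfl (by norm_num)]
  rw [altLoop_eq_passG ((video.length : Int) - lenght).toNat _ _ rfl]
  norm_num
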